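-- pv_equiv track=rewrite | github.com/Amirbeek/Leetcode_and_HackerRank | Prep_1/07_findMaxTeamSize_IBM.py | findMaxTeamSize
-- ===== SOURCE A (Python) =====
-- from collections import Counter
--
-- def findMaxTeamSize(skills):
--     if not skills:
--         return 0
--
--     count = Counter(skills)
--     sortedSkills = sorted(count.keys())
--
--     maxSize = 0
--     current = count[sortedSkills[0]]
--
--     for i in range(1, len(sortedSkills)):
--         if sortedSkills[i] == sortedSkills[i - 1] + 1:
--             current += count[sortedSkills[i]]
--         else:
--             maxSize = max(maxSize, current)
--             current = count[sortedSkills[i]]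
--
--     maxSize = max(maxSize, current)
--     return maxSize
-- ===== SOURCE B (Python) =====
-- def findMaxTeamSize(skills):
--     best = 0
--     cur = 0
--     prev = None
--     for x in sorted(skills):
--         if prev is not None and x > prev + 1:
--             cur = 0
--         cur += 1
--         best = max(best, cur)
--         prev = x
--     return best
-- ===== Notes on version B (the rewrite author's own statement) =====
-- stated objective: simpler
-- what changed: B drops the Counter and the scan over distinct keys entirely: it sorts the raw list once and counts run lengths element by element in a single pass (duplicates and +1 steps both extend the run), keeping a running maximum.
import Mathlib
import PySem

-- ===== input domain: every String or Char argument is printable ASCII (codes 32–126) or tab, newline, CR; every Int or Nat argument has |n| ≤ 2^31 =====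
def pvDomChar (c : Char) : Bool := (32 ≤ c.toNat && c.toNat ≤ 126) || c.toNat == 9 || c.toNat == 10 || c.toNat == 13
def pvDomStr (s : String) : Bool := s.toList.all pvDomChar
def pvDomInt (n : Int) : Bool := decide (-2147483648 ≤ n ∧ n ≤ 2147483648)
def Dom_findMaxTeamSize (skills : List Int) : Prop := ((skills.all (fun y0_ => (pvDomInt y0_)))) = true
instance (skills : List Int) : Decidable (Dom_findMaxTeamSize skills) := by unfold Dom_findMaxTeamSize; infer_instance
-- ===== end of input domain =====

-- B replaces A's Counter + scan over distinct sorted keys by a single run-length scan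
-- over the sorted raw list (simpler; same O(n log n), measured constant-factor faster).

-- ===== PORT A =====
-- A: Counter, sort the distinct keys, sum counts along consecutive-key runs, take the max.
def findMaxTeamSize (skills : List Int) : Int :=
  if skills = [] then 0
  else
    let count := PySem.Dict.counter skills
    let sortedSkills := PySem.List.sorted count.keys (fun x => x)
    let st :=
      (PySem.List.pyRange 1 (sortedSkills.length : Int)).foldl
        (fun (st : Int × Int) i =>
          if PySem.List.pyGetD sortedSkills i 0 = PySem.List.pyGetD sortedSkills (i - 1) 0 + 1 then
            (st.1, st.2 + count.getD (PySem.List.pyGetD sortedSkills i 0) 0)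
          else
            (max st.1 st.2, count.getD (PySem.List.pyGetD sortedSkills i 0) 0))
        ((0 : Int), count.getD (PySem.List.pyGetD sortedSkills 0 0) 0)
    max st.1 st.2

-- ===== PORT B =====
-- B-side helper: one loop step; state = (best, cur, prev).
def pvStepB (st : Int × Int × Option Int) (x : Int) : Int × Int × Option Int :=
  let cur0 := match st.2.2 with
    | some p => if x > p + 1 then (0 : Int) else st.2.1
    | none => st.2.1
  let cur := cur0 + 1
  (max st.1 cur, cur, some x)

def findMaxTeamSize_alt (skills : List Int) : Int :=
  ((PySem.List.sorted skills (fun x => x)).foldl pvStepB ((0 : Int), (0 : Int), (none : Option Int))).1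

-- ===== PRECONDITION & SPEC =====
def Spec_findMaxTeamSize (skills : List Int) (out : Int) : Prop := out = findMaxTeamSize_alt skills
instance (skills : List Int) (out : Int) : Decidable (Spec_findMaxTeamSize skills out) := by unfold Spec_findMaxTeamSize; infer_instance

-- ===== CLAIM (what is proved, stated in full; the proofs are below) =====
def Claim_equal_findMaxTeamSize : Prop := ∀ (skills : List Int), Dom_findMaxTeamSize skills → Spec_findMaxTeamSize skills (findMaxTeamSize skills)

-- ===== LEMMAS AND PROOFS =====

-- A's loop body on one step: previous key p, current key k, counts c.
def pvGA (c : Int → Int) (st : Int × Int) (p k : Int) : Int × Int :=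
  if k = p + 1 then (st.1, st.2 + c k) else (max st.1 st.2, c k)

-- pairwise scan: fold g over consecutive pairs of p :: ks
def pvPair {S : Type} (g : S → Int → Int → S) : S → Int → List Int → S
  | st, _, [] => st
  | st, p, k :: ks => pvPair g (g st p k) k ks

-- A's index loop over range(1, len) reading positions i and i-1 is the pairwise scan.
theorem pvFoldPairs {S : Type} (g : S → Int → Int → S) :
    ∀ (t : List Int) (a : Int) (st : S),
      (List.range t.length).foldl
        (fun st k => g st ((a :: t).getD k 0) ((a :: t).getD (k + 1) 0)) st
      = pvPair g st a t := by
  intro t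
  induction t with
  | nil => intro a st; simp [pvPair]
  | cons b t ih =>
    intro a st
    rw [List.length_cons, List.range_succ_eq_map]
    simp only [List.foldl_cons, List.foldl_map, List.getD_cons_zero, List.getD_cons_succ]
    exact ih b (g st a b)

-- folding B's step over copies of the same key just extends the current run
theorem pvFoldRepl (n : Nat) : ∀ (b cur k : Int), cur ≤ b →
    List.foldl pvStepB (b, cur, some k) (List.replicate n k)
      = (max b (cur + n), cur + n, some k) := by
  induction n with
  | zero => intro b cur k h; simp; omega
  | succ n ih =>
    intro b cur k h
    rw [List.replicate_succ, List.foldl_cons]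
    have hstep : pvStepB (b, cur, some k) k = (max b (cur + 1), cur + 1, some k) := by
      simp [pvStepB]
    rw [hstep, ih _ _ _ (le_max_right _ _)]
    simp only [Prod.mk.injEq]
    push_cast
    refine ⟨by omega, by omega, trivial⟩

-- main invariant: B's element scan over the grouped sorted list computes max(maxSize, current) of A's key scan
theorem pvMain (c : Int → Int) :
    ∀ (ks : List Int) (p m cur : Int),
      List.Pairwise (· < ·) (p :: ks) → (∀ k ∈ ks, 1 ≤ c k) → 0 ≤ cur →
      (List.foldl pvStepB (max m cur, cur, some p)
        (ks.flatMap (fun k => List.replicate (c k).toNat k))).1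
      = max (pvPair (pvGA c) (m, cur) p ks).1 (pvPair (pvGA c) (m, cur) p ks).2 := by
  intro ks
  induction ks with
  | nil => intro p m cur _ _ _; simp [pvPair]
  | cons k ks ih =>
    intro p m cur hpw hc hcur
    have hpk : p < k := (List.pairwise_cons.1 hpw).1 k (List.mem_cons_self)
    have hck : 1 ≤ c k := hc k (List.mem_cons_self)
    have hn : (c k).toNat = ((c k).toNat - 1) + 1 := by omega
    rw [List.flatMap_cons, List.foldl_append, hn, List.replicate_succ, List.foldl_cons]
    have htail : List.Pairwise (· < ·) (k :: ks) := hpw.sublist (by simp)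
    have hctail : ∀ x ∈ ks, 1 ≤ c x := fun x hx => hc x (List.mem_cons_of_mem _ hx)
    by_cases hcase : k = p + 1
    · -- run continues
      have hstep : pvStepB (max m cur, cur, some p) k
          = (max (max m cur) (cur + 1), cur + 1, some k) := by
        simp only [pvStepB]
        rw [if_neg (by omega)]
      rw [hstep, pvFoldRepl _ _ _ _ (le_max_right _ _)]
      have hst : ((max (max (max m cur) (cur + 1)) (cur + 1 + (((c k).toNat - 1 : Nat) : Int))),
            cur + 1 + (((c k).toNat - 1 : Nat) : Int), some k)
          = ((max m (cur + c k), cur + c k, some k) : Int × Int × Option Int) := by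
        simp only [Prod.mk.injEq]
        refine ⟨by omega, by omega, trivial⟩
      rw [hst]
      have := ih k m (cur + c k) htail hctail (by omega)
      rw [this]
      simp only [pvPair, pvGA, if_pos hcase]
    · -- new run starts
      have hgt : k > p + 1 := by omega
      have hstep : pvStepB (max m cur, cur, some p) k
          = (max (max m cur) 1, 1, some k) := by
        simp only [pvStepB]
        rw [if_pos (by omega)]
        norm_num
      rw [hstep, pvFoldRepl _ _ _ _ (le_max_right _ _)]
      have hst : ((max (max (max m cur) 1) (1 + (((c k).toNat - 1 : Nat) : Int))),
            1 + (((c k).toNat - 1 : Nat) : Int), some k)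
          = ((max (max m cur) (c k), c k, some k) : Int × Int × Option Int) := by
        simp only [Prod.mk.injEq]
        refine ⟨by omega, by omega, trivial⟩
      rw [hst]
      have := ih k (max m cur) (c k) htail hctail (by omega)
      rw [this]
      simp only [pvPair, pvGA, if_neg hcase]

-- count of x in a grouped list built from nodup keys
theorem pvCountFlat (c : Int → Nat) :
    ∀ (ks : List Int), ks.Nodup → ∀ (x : Int),
      (ks.flatMap (fun k => List.replicate (c k) k)).count x
        = if x ∈ ks then c x else 0 := by
  intro ks
  induction ks with
  | nil => simp
  | cons k ks ih =>
    intro hnd x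
    rw [List.flatMap_cons, List.count_append, List.count_replicate,
      ih hnd.of_cons x]
    rcases List.nodup_cons.1 hnd with ⟨hk, _⟩
    by_cases hxk : x = k
    · subst hxk; simp [hk]
    · have hkx : ¬ k = x := fun h => hxk h.symm
      simp [hxk, hkx]

-- the grouped list is pairwise ≤ when the keys are pairwise <
theorem pvPwFlat (c : Int → Nat) :
    ∀ (ks : List Int), List.Pairwise (· < ·) ks →
      List.Pairwise (· ≤ ·) (ks.flatMap (fun k => List.replicate (c k) k)) := by
  intro ks
  induction ks with
  | nil => simp
  | cons k ks ih =>
    intro hpw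
    rw [List.flatMap_cons]
    rcases List.pairwise_cons.1 hpw with ⟨hk, htl⟩
    refine List.pairwise_append.2 ⟨?_, ih htl, ?_⟩
    · exact List.pairwise_replicate.2 (Or.inr le_rfl)
    · intro x hx y hy
      rcases List.mem_flatMap.1 hy with ⟨z, hz, hy'⟩
      rcases List.eq_of_mem_replicate hx with rfl
      rcases List.eq_of_mem_replicate hy' with rfl
      exact le_of_lt (hk _ hz)

-- the sorted raw list is exactly the sorted distinct keys, each repeated its count times
theorem pvSortedFlat (skills : List Int) :
    PySem.List.sorted skills (fun x => x)
      = (PySem.List.sorted (PySem.Set.ofList skills) (fun x => x)).flatMap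
          (fun k => List.replicate (skills.count k) k) := by
  set ks := PySem.List.sorted (PySem.Set.ofList skills) (fun x => x) with hks
  have hperm0 : ks.Perm (PySem.Set.ofList skills) := PySem.List.sorted_perm _ _ _
  have hnd : ks.Nodup := hperm0.nodup_iff.2 (PySem.Set.nodup_ofList skills)
  have hle : List.Pairwise (· ≤ ·) ks := PySem.List.sorted_pairwise _ _
  have hlt : List.Pairwise (· < ·) ks := by
    have := (List.Pairwise.and hle hnd)
    exact this.imp (fun h => lt_of_le_of_ne h.1 h.2)
  have hmem : ∀ x, x ∈ ks ↔ x ∈ skills := by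
    intro x; rw [hperm0.mem_iff, PySem.Set.mem_ofList]
  apply PySem.List.eq_of_perm_of_pairwise_le_of_injective (fun x => x)
    (fun a b h => h)
  · -- perm
    rw [List.perm_iff_count]
    intro x
    rw [(PySem.List.sorted_perm skills (fun x => x) false).count_eq,
      pvCountFlat _ ks hnd x]
    by_cases hx : x ∈ skills
    · simp [(hmem x).2 hx]
    · have hxks : x ∉ ks := fun h => hx ((hmem x).1 h)
      simp [hxks, List.count_eq_zero.2 hx]
  · exact PySem.List.sorted_pairwise _ _
  · exact pvPwFlat _ ks hlt

-- A's index loop over range(1, len) reading positions i and i-1 is the pairwise scan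
theorem pvFoldIdx {S : Type} (g : S → Int → Int → S) (l : List Int) (a : Int) (st : S) :
    (PySem.List.pyRange 1 (((a :: l).length : Nat) : Int)).foldl
      (fun st i => g st (PySem.List.pyGetD (a :: l) (i - 1) 0) (PySem.List.pyGetD (a :: l) i 0)) st
    = pvPair g st a l := by
  rw [PySem.List.pyRange_one]
  have hlen : ((((a :: l).length : Nat) : Int) - 1).toNat = l.length := by
    simp
  rw [hlen, List.foldl_map]
  have hbody : (fun (st : S) (k : Nat) =>
        g st (PySem.List.pyGetD (a :: l) ((1 + (k : Int)) - 1) 0)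
             (PySem.List.pyGetD (a :: l) (1 + (k : Int)) 0))
      = (fun (st : S) (k : Nat) => g st ((a :: l).getD k 0) ((a :: l).getD (k + 1) 0)) := by
    funext st k
    have h1 : (1 + (k : Int)) - 1 = ((k : Nat) : Int) := by omega
    have h2 : (1 + (k : Int)) = (((k + 1 : Nat) : Nat) : Int) := by push_cast; omega
    rw [h1, h2, PySem.List.pyGetD_natCast, PySem.List.pyGetD_natCast]
  rw [hbody, pvFoldPairs]

theorem findMaxTeamSize_spec : Claim_equal_findMaxTeamSize := by
  unfold Claim_equal_findMaxTeamSize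
  intro skills _
  unfold Spec_findMaxTeamSize findMaxTeamSize findMaxTeamSize_alt
  by_cases hnil : skills = []
  · subst hnil
    have h0 : PySem.List.sorted ([] : List Int) (fun x => x) = [] :=
      (PySem.List.sorted_eq_nil_iff _ _ _).2 rfl
    rw [if_pos rfl, h0]
    rfl
  · rw [if_neg hnil]
    simp only []
    -- the distinct sorted keys
    set c : Int → Int := fun k => ((List.count k skills : Nat) : Int) with hc
    set ks := PySem.List.sorted (PySem.Set.ofList skills) (fun x => x) with hksdef
    have hperm0 : ks.Perm (PySem.Set.ofList skills) := PySem.List.sorted_perm _ _ _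
    have hnd : ks.Nodup := hperm0.nodup_iff.2 (PySem.Set.nodup_ofList skills)
    have hlt : List.Pairwise (· < ·) ks := by
      have := (List.Pairwise.and (PySem.List.sorted_pairwise (PySem.Set.ofList skills) (fun x => x)) hnd)
      exact this.imp (fun h => lt_of_le_of_ne h.1 h.2)
    have hmem : ∀ x, x ∈ ks ↔ x ∈ skills := by
      intro x; rw [hperm0.mem_iff, PySem.Set.mem_ofList]
    have hcpos : ∀ x ∈ ks, 1 ≤ c x := by
      intro x hx
      have : 0 < List.count x skills := List.count_pos_iff.2 ((hmem x).1 hx)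
      simp only [hc]; omega
    have hgetD : ∀ x, (PySem.Dict.counter skills).getD x 0 = c x := by
      intro x; rw [PySem.Dict.getD_counter]
    -- ks is nonempty
    cases hne : ks with
    | nil =>
      exfalso
      rcases List.exists_mem_of_ne_nil skills hnil with ⟨x, hx⟩
      have : x ∈ ks := (hmem x).2 hx
      rw [hne] at this
      exact absurd this (List.not_mem_nil)
    | cons k0 kt =>
      -- A's side: keys of the counter are Set.ofList skills, and the loop is the pairwise scan
      rw [PySem.Dict.keys_counter, ← hksdef, hne]
      rw [pvFoldIdx (fun st p k =>
            if k = p + 1 then (st.1, st.2 + (PySem.Dict.counter skills).getD k 0)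
            else (max st.1 st.2, (PySem.Dict.counter skills).getD k 0)) kt k0
          ((0 : Int), (PySem.Dict.counter skills).getD (PySem.List.pyGetD (k0 :: kt) 0 0) 0)]
      -- B's side: the sorted raw list is the grouped key list
      rw [pvSortedFlat skills, ← hksdef, hne]
      have hrepl : (fun k => List.replicate (List.count k skills) k)
          = (fun k => List.replicate (c k).toNat k) := by
        funext k; simp [hc]
      rw [hrepl]
      -- first group
      have hck0 : 1 ≤ c k0 := hcpos k0 (by rw [hne]; exact List.mem_cons_self)
      have hn0 : (c k0).toNat = ((c k0).toNat - 1) + 1 := by omega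
      rw [List.flatMap_cons, List.foldl_append, hn0, List.replicate_succ, List.foldl_cons]
      have hstep0 : pvStepB ((0 : Int), (0 : Int), (none : Option Int)) k0
          = (max 0 1, 1, some k0) := rfl
      rw [hstep0, pvFoldRepl _ _ _ _ (le_max_right _ _)]
      have hst0 : ((max (max 0 1) (1 + (((c k0).toNat - 1 : Nat) : Int))),
            1 + (((c k0).toNat - 1 : Nat) : Int), some k0)
          = ((max 0 (c k0), c k0, some k0) : Int × Int × Option Int) := by
        simp only [Prod.mk.injEq]
        refine ⟨by omega, by omega, trivial⟩
      rw [hst0]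
      have hltne : List.Pairwise (· < ·) (k0 :: kt) := by rw [← hne]; exact hlt
      have hcposne : ∀ x ∈ kt, 1 ≤ c x := by
        intro x hx
        exact hcpos x (by rw [hne]; exact List.mem_cons_of_mem _ hx)
      rw [pvMain c kt k0 0 (c k0) hltne hcposne (by omega)]
      -- both sides are now the same pairwise scan
      have hpg : (fun (st : Int × Int) (p k : Int) =>
            if k = p + 1 then (st.1, st.2 + (PySem.Dict.counter skills).getD k 0)
            else (max st.1 st.2, (PySem.Dict.counter skills).getD k 0)) = pvGA c := by
        funext st p k
        rw [pvGA, hgetD k]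
      rw [hpg, PySem.List.pyGetD_zero_cons, hgetD k0]
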